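-- pv_equiv track=rewrite | github.com/m-i-n-a-r/vertex-clustering | Step1.py | generate_6_7_from_8_shingleVec
-- ===== SOURCE A (Python) =====
-- def generate_6_7_from_8_shingleVec(shingle_vec):
--
-- 	#inizializzo il dict finale e un dict temporaneo per gli shingle 7/8
-- 	H={}
-- 	HTemp={}
--
-- 	shingle_dict={shingle_vec:0}
--
-- 	#per ogni shingle 8/8 copio elemento per elemento sostituendo un elemento per posizione con la wind card
-- 	# e aggiungo il risultato nel dict temporaneo
-- 	for key in shingle_dict:
-- 		for m in range(8):
-- 			a= ()
-- 			for n in range(8):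
-- 				if  m != n:
-- 					a= a + (key[n],)
-- 				else :
-- 					a= a+ ("*",)
-- 			HTemp[a]=0
--
-- 	#per ogni shingle 7/8 copio elemento per elemento sostituendo un elemento per posizione con la wind card
-- 	# e aggiungo il risultato nel dict finale
-- 	for key in HTemp.keys():
-- 		for m in range(8):
-- 			a= ()
-- 			for n in range(8):
-- 				if  m != n:
-- 					a= a + (key[n],)
-- 				else :
-- 					a= a+ ("*",)
-- 			H[a]=0
--
-- 	#aggiungo lo shingle 8/8 al dict finale
-- 	H[shingle_vec]=0
-- 	return H
-- ===== SOURCE B (Python) =====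
-- def generate_6_7_from_8_shingleVec(shingle_vec):
-- 	# Direct subset enumeration: for each set of 1 or 2 positions among the
-- 	# first 8, emit the tuple with '*' at those positions; the dict dedups.
-- 	H = {}
-- 	for i in range(8):
-- 		H[tuple('*' if n == i else shingle_vec[n] for n in range(8))] = 0
-- 		for j in range(i + 1, 8):
-- 			H[tuple('*' if n in (i, j) else shingle_vec[n] for n in range(8))] = 0
-- 	H[shingle_vec] = 0
-- 	return H
-- ===== Notes on version B (the rewrite author's own statement) =====
-- stated objective: simpler
-- what changed: Replaces A's two-stage wildcard-of-wildcard generation through an intermediate dict of one-wildcard shingles (64 tuple constructions plus dict-key iteration) by direct enumeration of the 1- and 2-element position subsets of range(8), building each variant once.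
import Mathlib
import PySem

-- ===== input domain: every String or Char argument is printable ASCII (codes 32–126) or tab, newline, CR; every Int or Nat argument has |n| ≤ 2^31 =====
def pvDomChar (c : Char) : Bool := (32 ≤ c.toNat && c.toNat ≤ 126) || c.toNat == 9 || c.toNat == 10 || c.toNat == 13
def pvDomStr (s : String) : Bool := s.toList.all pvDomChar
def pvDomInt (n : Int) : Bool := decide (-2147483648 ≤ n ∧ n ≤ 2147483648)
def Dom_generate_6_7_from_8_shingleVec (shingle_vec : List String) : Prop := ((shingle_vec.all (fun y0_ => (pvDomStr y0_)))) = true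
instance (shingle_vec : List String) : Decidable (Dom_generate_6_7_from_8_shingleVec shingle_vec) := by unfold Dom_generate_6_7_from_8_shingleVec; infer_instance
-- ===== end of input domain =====

-- B replaces A's two-stage wildcard-of-wildcard generation (via an intermediate dict of
-- one-wildcard shingles) by direct enumeration of the 1- and 2-position subsets of range(8);
-- same dict (same keys, values, insertion order) on every input of Pre_ (length ≥ 8).

-- ===== PORT A =====
-- inner tuple build: a = a + (key[n],) / a + ("*",) for n in range(8)
def pvTupA (key : List String) (m : Int) : List String :=
  (PySem.List.pyRange 0 8 1).foldl
    (fun a n => a ++ [if m ≠ n then PySem.List.pyGetD key n "" else "*"]) []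

def generate_6_7_from_8_shingleVec (shingle_vec : List String) : List (List String × Int) :=
  let shingle_dict : PySem.Dict (List String) Int := PySem.Dict.empty.insert shingle_vec 0
  let HTemp : PySem.Dict (List String) Int :=
    shingle_dict.keys.foldl (fun HTemp key =>
      (PySem.List.pyRange 0 8 1).foldl (fun HTemp m => HTemp.insert (pvTupA key m) 0) HTemp)
      PySem.Dict.empty
  let H : PySem.Dict (List String) Int :=
    HTemp.keys.foldl (fun H key =>
      (PySem.List.pyRange 0 8 1).foldl (fun H m => H.insert (pvTupA key m) 0) H)
      PySem.Dict.empty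
  (H.insert shingle_vec 0).items

-- ===== PORT B =====
def generate_6_7_from_8_shingleVec_alt (shingle_vec : List String) : List (List String × Int) :=
  let H : PySem.Dict (List String) Int :=
    (PySem.List.pyRange 0 8 1).foldl (fun H i =>
      let H := H.insert
        ((PySem.List.pyRange 0 8 1).map
          (fun n => if n = i then "*" else PySem.List.pyGetD shingle_vec n "")) 0
      (PySem.List.pyRange (i+1) 8 1).foldl (fun H j =>
        H.insert
          ((PySem.List.pyRange 0 8 1).map
            (fun n => if n = i ∨ n = j then "*" else PySem.List.pyGetD shingle_vec n "")) 0) H)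
      PySem.Dict.empty
  (H.insert shingle_vec 0).items

-- ===== PRECONDITION & SPEC =====
-- Pre_ excludes exactly the inputs on which Python A raises IndexError (key[n], n < 8).
def Pre_generate_6_7_from_8_shingleVec (shingle_vec : List String) : Prop :=
  8 ≤ shingle_vec.length
instance (shingle_vec : List String) : Decidable (Pre_generate_6_7_from_8_shingleVec shingle_vec) := by unfold Pre_generate_6_7_from_8_shingleVec; infer_instance

def pvWitness_generate_6_7_from_8_shingleVec : List String :=
  ["a", "b", "c", "d", "e", "f", "g", "h"]

def Spec_generate_6_7_from_8_shingleVec (shingle_vec : List String) (out : List (List String × Int)) : Prop := out = generate_6_7_from_8_shingleVec_alt shingle_vec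
instance (shingle_vec : List String) (out : List (List String × Int)) : Decidable (Spec_generate_6_7_from_8_shingleVec shingle_vec out) := by unfold Spec_generate_6_7_from_8_shingleVec; infer_instance

-- ===== CLAIM (what is proved, stated in full; the proofs are below) =====
def Claim_equal_generate_6_7_from_8_shingleVec : Prop := ∀ (shingle_vec : List String), Dom_generate_6_7_from_8_shingleVec shingle_vec → Pre_generate_6_7_from_8_shingleVec shingle_vec → Spec_generate_6_7_from_8_shingleVec shingle_vec (generate_6_7_from_8_shingleVec shingle_vec)

-- ===== LEMMAS AND PROOFS =====

-- dict of Int values keyed by 8-tuples (as lists) of strings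
abbrev DS : Type := PySem.Dict (List String) Int

def ins0 (d : DS) (k : List String) : DS := PySem.Dict.insert d k 0

def chain (d : DS) (L : List (List String)) : DS := L.foldl ins0 d

def blockOf (K : List String) : List (List String) :=
  (PySem.List.pyRange 0 8 1).map (fun m => pvTupA K m)

def gstep (d : DS) (K : List String) : DS := chain d (blockOf K)

-- first-occurrence dedup on index pairs
def dedupAux : List (Nat × Nat) → List (Nat × Nat) → List (Nat × Nat)
  | [], _ => []
  | x :: l, seen => if x ∈ seen then dedupAux l seen else x :: dedupAux l (x :: seen)

def dedupF (l : List (Nat × Nat)) : List (Nat × Nat) := dedupAux l []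

def idxA : List (Nat × Nat) := [(0, 0), (0, 1), (0, 2), (0, 3), (0, 4), (0, 5), (0, 6), (0, 7), (0, 1), (1, 1), (1, 2), (1, 3), (1, 4), (1, 5), (1, 6), (1, 7), (0, 2), (1, 2), (2, 2), (2, 3), (2, 4), (2, 5), (2, 6), (2, 7), (0, 3), (1, 3), (2, 3), (3, 3), (3, 4), (3, 5), (3, 6), (3, 7), (0, 4), (1, 4), (2, 4), (3, 4), (4, 4), (4, 5), (4, 6), (4, 7), (0, 5), (1, 5), (2, 5), (3, 5), (4, 5), (5, 5), (5, 6), (5, 7), (0, 6), (1, 6), (2, 6), (3, 6), (4, 6), (5, 6), (6, 6), (6, 7), (0, 7), (1, 7), (2, 7), (3, 7), (4, 7), (5, 7), (6, 7), (7, 7)]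

def idxB : List (Nat × Nat) := [(0, 0), (0, 1), (0, 2), (0, 3), (0, 4), (0, 5), (0, 6), (0, 7), (1, 1), (1, 2), (1, 3), (1, 4), (1, 5), (1, 6), (1, 7), (2, 2), (2, 3), (2, 4), (2, 5), (2, 6), (2, 7), (3, 3), (3, 4), (3, 5), (3, 6), (3, 7), (4, 4), (4, 5), (4, 6), (4, 7), (5, 5), (5, 6), (5, 7), (6, 6), (6, 7), (7, 7)]

-- the wildcard key with '*' at positions p.1 and p.2
def pvF (s0 s1 s2 s3 s4 s5 s6 s7 : String) (p : Nat × Nat) : List String :=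
  [if 0 = p.1 ∨ 0 = p.2 then "*" else s0,
   if 1 = p.1 ∨ 1 = p.2 then "*" else s1,
   if 2 = p.1 ∨ 2 = p.2 then "*" else s2,
   if 3 = p.1 ∨ 3 = p.2 then "*" else s3,
   if 4 = p.1 ∨ 4 = p.2 then "*" else s4,
   if 5 = p.1 ∨ 5 = p.2 then "*" else s5,
   if 6 = p.1 ∨ 6 = p.2 then "*" else s6,
   if 7 = p.1 ∨ 7 = p.2 then "*" else s7]

lemma get?_chain (L : List (List String)) : ∀ (d : DS) (k : List String),
    (chain d L).get? k = if k ∈ L then some 0 else PySem.Dict.get? d k := by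
  induction L with
  | nil => intro d k; simp [chain]
  | cons x L ih =>
      intro d k
      show (chain (ins0 d x) L).get? k = _
      rw [ih]
      by_cases hx : k = x
      · subst hx
        by_cases hL : k ∈ L <;>
          simp [hL, ins0, PySem.Dict.get?_insert_self]
      · by_cases hL : k ∈ L <;>
          simp [hL, hx, ins0, PySem.Dict.get?_insert_of_ne _ _ hx]

lemma nodup_chain (L : List (List String)) : ∀ (d : DS),
    (PySem.Dict.keys d).Nodup → (PySem.Dict.keys (chain d L)).Nodup := by
  induction L with
  | nil => intro d h; exact h
  | cons x L ih =>
      intro d h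
      exact ih _ (PySem.Dict.nodup_keys_insert _ _ _ h)

lemma insert_noop (d : DS) (k : List String)
    (hnd : (PySem.Dict.keys d).Nodup) (h : PySem.Dict.get? d k = some 0) :
    PySem.Dict.insert d k 0 = d := by
  have hc : PySem.Dict.contains d k = true := by
    rw [PySem.Dict.contains_eq_isSome_get?, h]; rfl
  apply PySem.Dict.ext
  rw [PySem.Dict.items_insert_of_contains _ _ hc]
  conv_rhs => rw [← List.map_id (PySem.Dict.items d)]
  apply List.map_congr_left
  intro p hp
  by_cases hpk : p.1 = k
  · have : PySem.Dict.get? d p.1 = some p.2 := by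
      obtain ⟨a, b⟩ := p
      exact PySem.Dict.get?_of_mem_items _ hp hnd
    rw [hpk, h] at this
    simp [hpk, Prod.ext_iff, (Option.some_inj.mp this).symm]
  · simp [hpk]

lemma chain_noop (L : List (List String)) : ∀ (d : DS),
    (PySem.Dict.keys d).Nodup → (∀ k ∈ L, PySem.Dict.get? d k = some 0) →
    chain d L = d := by
  induction L with
  | nil => intro d _ _; rfl
  | cons x L ih =>
      intro d hnd h
      show chain (ins0 d x) L = d
      have hx : ins0 d x = d := insert_noop d x hnd (h x (by simp))
      rw [hx]
      exact ih d hnd (fun k hk => h k (by simp [hk]))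

lemma nodup_gfold (M : List (List String)) : ∀ (d : DS),
    (PySem.Dict.keys d).Nodup → (PySem.Dict.keys (M.foldl gstep d)).Nodup := by
  induction M with
  | nil => intro d h; exact h
  | cons K M ih => intro d h; exact ih _ (nodup_chain _ _ h)

lemma absorb (L : List (List String)) : ∀ (d acc : DS),
    (PySem.Dict.keys d).Nodup → (PySem.Dict.keys acc).Nodup →
    (∀ K, PySem.Dict.contains d K = true →
      ∀ k ∈ blockOf K, PySem.Dict.get? ((PySem.Dict.keys d).foldl gstep acc) k = some 0) →
    ((L.foldl ins0 d).keys).foldl gstep acc = L.foldl gstep ((PySem.Dict.keys d).foldl gstep acc) := by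
  induction L with
  | nil => intro d acc _ _ _; rfl
  | cons K L ih =>
      intro d acc hnd hacc hinv
      have hgoal : ((K :: L).foldl ins0 d).keys.foldl gstep acc
          = ((L.foldl ins0 (PySem.Dict.insert d K 0)).keys).foldl gstep acc := rfl
      rw [hgoal, List.foldl_cons]
      by_cases hc : PySem.Dict.contains d K = true
      · have hkeys : (PySem.Dict.insert d K 0).keys = PySem.Dict.keys d :=
          PySem.Dict.keys_insert_of_contains d 0 hc
        have hnd' : ((PySem.Dict.insert d K 0).keys).Nodup := by rw [hkeys]; exact hnd
        have hinv' : ∀ K', PySem.Dict.contains (PySem.Dict.insert d K 0) K' = true →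
            ∀ k ∈ blockOf K',
              PySem.Dict.get? (((PySem.Dict.insert d K 0).keys).foldl gstep acc) k = some 0 := by
          intro K' hK' k hk
          rw [hkeys]
          have hcase : K' = K ∨ PySem.Dict.contains d K' = true := by
            simpa [PySem.Dict.contains_insert] using hK'
          rcases hcase with h | h
          · exact hinv K hc k (h ▸ hk)
          · exact hinv K' h k hk
        rw [ih (PySem.Dict.insert d K 0) acc hnd' hacc hinv', hkeys]
        have hnoop : gstep ((PySem.Dict.keys d).foldl gstep acc) K
            = (PySem.Dict.keys d).foldl gstep acc :=
          chain_noop _ _ (nodup_gfold _ _ hacc) (hinv K hc)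
        rw [hnoop]
      · have hcf : PySem.Dict.contains d K = false := by simpa using hc
        have hkeys : (PySem.Dict.insert d K 0).keys = PySem.Dict.keys d ++ [K] :=
          PySem.Dict.keys_insert_of_not_contains d 0 hcf
        have hnd' : ((PySem.Dict.insert d K 0).keys).Nodup :=
          PySem.Dict.nodup_keys_insert d K 0 hnd
        have hS : ((PySem.Dict.insert d K 0).keys).foldl gstep acc
            = gstep ((PySem.Dict.keys d).foldl gstep acc) K := by
          rw [hkeys, List.foldl_append, List.foldl_cons, List.foldl_nil]
        have hinv' : ∀ K', PySem.Dict.contains (PySem.Dict.insert d K 0) K' = true →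
            ∀ k ∈ blockOf K',
              PySem.Dict.get? (((PySem.Dict.insert d K 0).keys).foldl gstep acc) k = some 0 := by
          intro K' hK' k hk
          rw [hS]
          have hcase : K' = K ∨ PySem.Dict.contains d K' = true := by
            simpa [PySem.Dict.contains_insert] using hK'
          rcases hcase with h | h
          · subst h
            rw [show gstep ((PySem.Dict.keys d).foldl gstep acc) K'
                  = chain ((PySem.Dict.keys d).foldl gstep acc) (blockOf K') from rfl,
                get?_chain]
            simp [hk]
          · rw [show gstep ((PySem.Dict.keys d).foldl gstep acc) K
                  = chain ((PySem.Dict.keys d).foldl gstep acc) (blockOf K) from rfl,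
                get?_chain]
            split
            · rfl
            · exact hinv K' h k hk
        rw [ih (PySem.Dict.insert d K 0) acc hnd' hacc hinv', hS]

lemma chain_dedupAux (f : Nat × Nat → List String) (l : List (Nat × Nat)) :
    ∀ (seen : List (Nat × Nat)) (d : DS), (PySem.Dict.keys d).Nodup →
      (∀ y ∈ seen, PySem.Dict.get? d (f y) = some 0) →
      chain d (l.map f) = chain d ((dedupAux l seen).map f) := by
  induction l with
  | nil => intro seen d _ _; rfl
  | cons x l ih =>
      intro seen d hnd hseen
      by_cases hx : x ∈ seen
      · rw [show dedupAux (x :: l) seen = dedupAux l seen from by simp [dedupAux, hx]]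
        show chain (ins0 d (f x)) (l.map f) = _
        rw [show ins0 d (f x) = d from insert_noop _ _ hnd (hseen x hx)]
        exact ih seen d hnd hseen
      · rw [show dedupAux (x :: l) seen = x :: dedupAux l (x :: seen) from by
            simp [dedupAux, hx]]
        show chain (ins0 d (f x)) (l.map f) = chain (ins0 d (f x)) ((dedupAux l (x :: seen)).map f)
        apply ih (x :: seen) _ (PySem.Dict.nodup_keys_insert _ _ _ hnd)
        intro y hy
        show (PySem.Dict.insert d (f x) 0).get? (f y) = some 0
        rw [PySem.Dict.get?_insert]
        rcases List.mem_cons.mp hy with h | h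
        · subst h; simp
        · split <;> [rfl; exact hseen y h]

def blockB (sv : List String) (i : Int) : List (List String) :=
  ((PySem.List.pyRange 0 8 1).map
      (fun n => if n = i then "*" else PySem.List.pyGetD sv n "")) ::
    (PySem.List.pyRange (i+1) 8 1).map
      (fun j => (PySem.List.pyRange 0 8 1).map
        (fun n => if n = i ∨ n = j then "*" else PySem.List.pyGetD sv n ""))

lemma pyGetD_append_left (xs ys : List String) (n : Int) (h0 : 0 ≤ n) (h1 : n < (xs.length : Int)) :
    PySem.List.pyGetD (xs ++ ys) n "" = PySem.List.pyGetD xs n "" := by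
  rw [PySem.List.pyGetD_eq_getElem _ _ h0 (by simp; omega),
      PySem.List.pyGetD_eq_getElem _ _ h0 h1]
  exact List.getElem_append_left _

lemma pvTupA_cut (xs ys : List String) (h : xs.length = 8) (m : Int) :
    pvTupA (xs ++ ys) m = pvTupA xs m := by
  unfold pvTupA
  apply PySem.List.foldl_congr_mem
  intro acc n hn
  have := PySem.List.mem_pyRange_one.mp hn
  by_cases hm : m ≠ n
  · simp only [if_pos hm]
    rw [pyGetD_append_left _ _ _ (by omega) (by rw [h]; exact_mod_cast this.2)]
  · simp [hm]

lemma blockOf_cut (xs ys : List String) (h : xs.length = 8) :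
    blockOf (xs ++ ys) = blockOf xs := by
  unfold blockOf
  exact List.map_congr_left fun m _ => pvTupA_cut xs ys h m

lemma blockB_cut (xs ys : List String) (h : xs.length = 8) (i : Int) :
    blockB (xs ++ ys) i = blockB xs i := by
  unfold blockB
  congr 1
  · apply List.map_congr_left
    intro n hn
    have := PySem.List.mem_pyRange_one.mp hn
    by_cases hni : n = i
    · simp [hni]
    · simp only [if_neg hni]
      exact pyGetD_append_left _ _ _ (by omega) (by rw [h]; exact_mod_cast this.2)
  · apply List.map_congr_left
    intro j _
    apply List.map_congr_left
    intro n hn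
    have := PySem.List.mem_pyRange_one.mp hn
    by_cases hni : n = i ∨ n = j
    · simp [hni]
    · simp only [if_neg hni]
      exact pyGetD_append_left _ _ _ (by omega) (by rw [h]; exact_mod_cast this.2)

lemma gstep_flat (M : List (List String)) : ∀ (d : DS),
    M.foldl gstep d = chain d (M.flatMap blockOf) := by
  induction M with
  | nil => intro d; rfl
  | cons K M ih =>
      intro d
      show M.foldl gstep (gstep d K) = chain d (blockOf K ++ M.flatMap blockOf)
      rw [ih]
      simp only [chain, List.foldl_append]
      rfl

lemma chainB_flat (sv : List String) (l : List Int) : ∀ (d : DS),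
    l.foldl (fun d i => chain d (blockB sv i)) d = chain d (l.flatMap (blockB sv)) := by
  induction l with
  | nil => intro d; rfl
  | cons i l ih =>
      intro d
      show l.foldl _ (chain d (blockB sv i)) = chain d (blockB sv i ++ l.flatMap (blockB sv))
      rw [ih]
      simp only [chain, List.foldl_append]

lemma a_eq (sv : List String) : generate_6_7_from_8_shingleVec sv
    = (PySem.Dict.insert
        ((((blockOf sv).foldl ins0 PySem.Dict.empty).keys).foldl gstep PySem.Dict.empty)
        sv 0).items := by
  simp only [generate_6_7_from_8_shingleVec]
  rw [show (fun (HTemp : PySem.Dict (List String) Int) key =>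
        (PySem.List.pyRange 0 8 1).foldl (fun HTemp m => HTemp.insert (pvTupA key m) 0) HTemp)
      = gstep from funext fun d => funext fun K => by
        simp only [gstep, chain, blockOf, List.foldl_map]; rfl]
  rw [show PySem.Dict.keys (PySem.Dict.insert (PySem.Dict.empty : DS) sv 0) = [] ++ [sv] from
      PySem.Dict.keys_insert_of_not_contains _ _ (by simp)]
  simp only [List.nil_append, List.foldl_cons, List.foldl_nil]
  rfl

lemma b_eq (sv : List String) : generate_6_7_from_8_shingleVec_alt sv
    = (PySem.Dict.insert
        (chain PySem.Dict.empty ((PySem.List.pyRange 0 8 1).flatMap (blockB sv)))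
        sv 0).items := by
  simp only [generate_6_7_from_8_shingleVec_alt]
  rw [← chainB_flat sv]
  rw [show (fun (H : PySem.Dict (List String) Int) i =>
        let H' := H.insert
          ((PySem.List.pyRange 0 8 1).map
            (fun n => if n = i then "*" else PySem.List.pyGetD sv n "")) 0
        (PySem.List.pyRange (i+1) 8 1).foldl (fun H j =>
          H.insert
            ((PySem.List.pyRange 0 8 1).map
              (fun n => if n = i ∨ n = j then "*" else PySem.List.pyGetD sv n "")) 0) H')
      = (fun (d : PySem.Dict (List String) Int) i => chain d (blockB sv i)) from funext fun d => funext fun i => by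
        simp only [blockB, chain, List.foldl_cons, List.foldl_map]; rfl]

-- ===== VERDICT (by name: the statement is the Claim_ definition above) =====
set_option maxHeartbeats 2000000 in
theorem generate_6_7_from_8_shingleVec_spec : Claim_equal_generate_6_7_from_8_shingleVec := by
  intro sv _ hpre
  unfold Spec_generate_6_7_from_8_shingleVec
  match sv, hpre with
  | s0 :: s1 :: s2 :: s3 :: s4 :: s5 :: s6 :: s7 :: rest, _ =>
    rw [a_eq, b_eq]
    rw [absorb (blockOf (s0 :: s1 :: s2 :: s3 :: s4 :: s5 :: s6 :: s7 :: rest))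
      PySem.Dict.empty PySem.Dict.empty (by simp) (by simp)
      (by intro K hK; simp [PySem.Dict.contains_empty] at hK)]
    simp only [PySem.Dict.keys_empty, List.foldl_nil]
    rw [gstep_flat]
    have hKA : (blockOf (s0 :: s1 :: s2 :: s3 :: s4 :: s5 :: s6 :: s7 :: rest)).flatMap blockOf
        = idxA.map (pvF s0 s1 s2 s3 s4 s5 s6 s7) := by
      rw [show (s0 :: s1 :: s2 :: s3 :: s4 :: s5 :: s6 :: s7 :: rest)
            = [s0, s1, s2, s3, s4, s5, s6, s7] ++ rest from rfl,
          blockOf_cut _ _ rfl]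
      rfl
    have hKB : (PySem.List.pyRange 0 8 1).flatMap
          (blockB (s0 :: s1 :: s2 :: s3 :: s4 :: s5 :: s6 :: s7 :: rest))
        = idxB.map (pvF s0 s1 s2 s3 s4 s5 s6 s7) := by
      rw [show (s0 :: s1 :: s2 :: s3 :: s4 :: s5 :: s6 :: s7 :: rest)
            = [s0, s1, s2, s3, s4, s5, s6, s7] ++ rest from rfl]
      rw [show blockB ([s0, s1, s2, s3, s4, s5, s6, s7] ++ rest)
            = blockB [s0, s1, s2, s3, s4, s5, s6, s7] from funext (blockB_cut _ _ rfl)]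
      rfl
    rw [hKA, hKB, chain_dedupAux _ idxA [] _ (by simp) (by simp),
        show dedupAux idxA [] = idxB from by rfl]
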